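-- pv_equiv track=rewrite | github.com/bipuldikshit/FigmaForge | src/generators/typescript_generator.py | _abbreviate
-- ===== SOURCE A (Python) =====
-- def _abbreviate(name: str) -> str:
--     """Abbreviate long property names."""
--     abbrevs = {
--         "description": "desc", "information": "info", "message": "msg",
--         "template": "tmpl", "navigation": "nav", "button": "btn",
--         "image": "img", "configuration": "config", "certificate": "cert",
--         "customer": "cust", "corporate": "corp", "instructions": "instr",
--         "document": "doc", "application": "app"
--     }
--
--     words = []
--     current = ""
--     for c in name:
--         if c.isupper() and current:
--             words.append(current.lower())
--             current = c
--         else: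
--             current += c
--     if current:
--         words.append(current.lower())
--
--     abbreviated = [abbrevs.get(w, w) for w in words]
--
--     if not abbreviated:
--         return name[:40]
--
--     result = abbreviated[0]
--     for w in abbreviated[1:]:
--         result += w.capitalize()
--
--     return result[:40] if len(result) > 40 else result
-- ===== SOURCE B (Python) =====
-- def _abbreviate(name: str) -> str:
--     """Abbreviate long property names (index-table splitting instead of a char accumulator)."""
--     abbrevs = {
--         "description": "desc", "information": "info", "message": "msg",
--         "template": "tmpl", "navigation": "nav", "button": "btn",
--         "image": "img", "configuration": "config", "certificate": "cert",
--         "customer": "cust", "corporate": "corp", "instructions": "instr",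
--         "document": "doc", "application": "app"
--     }
--
--     bounds = [i for i, c in enumerate(name) if c.isupper()]
--     cuts = [0] + [i for i in bounds if i > 0] + [len(name)]
--     raw = [name[a:b] for a, b in zip(cuts, cuts[1:])]
--     words = [abbrevs.get(w.lower(), w.lower()) for w in raw]
--     first, rest = words[0], words[1:]
--     return (first + "".join(w.capitalize() for w in rest))[:40]
-- ===== Notes on version B (the rewrite author's own statement) =====
-- stated objective: alternative
-- what changed: Replaces A's stateful char-accumulator tokenizer (words/current loop plus end-of-loop flush and a length-guarded truncation) by an index-table pass: collect the uppercase positions once, turn them into cut points, slice the name into words with zip(cuts, cuts[1:]), then map/join and unconditionally truncate with [:40].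
import Mathlib
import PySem

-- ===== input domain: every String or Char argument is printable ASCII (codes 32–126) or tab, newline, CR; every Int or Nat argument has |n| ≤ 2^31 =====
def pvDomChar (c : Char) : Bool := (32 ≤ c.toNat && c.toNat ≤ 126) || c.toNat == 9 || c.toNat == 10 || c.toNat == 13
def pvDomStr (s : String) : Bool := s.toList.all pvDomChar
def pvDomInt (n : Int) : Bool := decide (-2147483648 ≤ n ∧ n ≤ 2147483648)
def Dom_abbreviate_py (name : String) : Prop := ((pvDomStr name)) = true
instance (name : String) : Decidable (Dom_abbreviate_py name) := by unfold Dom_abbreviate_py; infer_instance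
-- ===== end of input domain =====

-- B replaces A's char-accumulator tokenizer by an uppercase-index table and zip-slicing (objective: alternative, same cost).

-- ===== PORT A =====
def pvAbbrevs : PySem.Dict (List Char) (List Char) :=
  PySem.Dict.ofList [
    ("description".toList, "desc".toList), ("information".toList, "info".toList),
    ("message".toList, "msg".toList), ("template".toList, "tmpl".toList),
    ("navigation".toList, "nav".toList), ("button".toList, "btn".toList),
    ("image".toList, "img".toList), ("configuration".toList, "config".toList),
    ("certificate".toList, "cert".toList), ("customer".toList, "cust".toList),
    ("corporate".toList, "corp".toList), ("instructions".toList, "instr".toList),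
    ("document".toList, "doc".toList), ("application".toList, "app".toList)]

-- str.capitalize (first char uppercased, rest lowercased); exact on the ASCII domain (no titlecase specials there)
def pvCapitalize (w : List Char) : List Char :=
  match w with
  | [] => []
  | c :: cs => PySem.Chars.upperChar c :: PySem.Chars.lower cs

-- the body of A's 'for c in name' loop, state = (words, current)
def pvStepA (st : List (List Char) × List Char) (c : Char) : List (List Char) × List Char :=
  if PySem.Chars.isupper c && !st.2.isEmpty then
    (st.1 ++ [PySem.Chars.lower st.2], [c])
  else
    (st.1, st.2 ++ [c])

def abbreviate_py (name : String) : String :=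
  let st := name.toList.foldl pvStepA ([], [])
  let words := if !st.2.isEmpty then st.1 ++ [PySem.Chars.lower st.2] else st.1
  let abbreviated := words.map (fun w => pvAbbrevs.getD w w)
  match abbreviated with
  | [] => String.ofList (PySem.List.slice name.toList none (some 40))
  | w0 :: rest =>
    let result := rest.foldl (fun acc w => acc ++ pvCapitalize w) w0
    if result.length > 40 then String.ofList (PySem.List.slice result none (some 40))
    else String.ofList result

-- ===== PORT B =====
def abbreviate_py_alt (name : String) : String :=
  let cl := name.toList
  let bounds := ((PySem.List.enumerate cl 0).filter (fun p => PySem.Chars.isupper p.2)).map (fun p => p.1)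
  let cuts := (0 : Int) :: (bounds.filter (fun i => 0 < i) ++ [(cl.length : Int)])
  let raw := (cuts.zip cuts.tail).map (fun p => PySem.List.slice cl (some p.1) (some p.2))
  let words := raw.map (fun w => pvAbbrevs.getD (PySem.Chars.lower w) (PySem.Chars.lower w))
  let first := words.headD []
  let rest := words.tail
  String.ofList (PySem.List.slice (first ++ PySem.Chars.join [] (rest.map pvCapitalize)) none (some 40))

-- ===== PRECONDITION & SPEC =====
def Spec_abbreviate_py (name : String) (out : String) : Prop := out = abbreviate_py_alt name
instance (name : String) (out : String) : Decidable (Spec_abbreviate_py name out) := by unfold Spec_abbreviate_py; infer_instance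

-- ===== CLAIM (what is proved, stated in full; the proofs are below) =====
def Claim_equal_abbreviate_py : Prop := ∀ (name : String), Dom_abbreviate_py name → Spec_abbreviate_py name (abbreviate_py name)

-- ===== LEMMAS AND PROOFS =====

-- the common word list both tokenizers compute: first char, then its run of non-uppercase chars, repeat
def pvNotUp (d : Char) : Bool := !PySem.Chars.isupper d

def pvWords : List Char → List (List Char)
  | [] => []
  | c :: cs =>
    (c :: cs.takeWhile pvNotUp) :: pvWords (cs.dropWhile pvNotUp)
  termination_by l => l.length
  decreasing_by
    simp only [List.length_cons]
    exact Nat.lt_succ_of_le (List.length_dropWhile_le _ _)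

def pvExtract (st : List (List Char) × List Char) : List (List Char) :=
  if !st.2.isEmpty then st.1 ++ [PySem.Chars.lower st.2] else st.1

lemma pvA_loop (cs : List Char) : ∀ (ws : List (List Char)) (cur : List Char), cur ≠ [] →
    pvExtract (cs.foldl pvStepA (ws, cur)) =
      ws ++ PySem.Chars.lower (cur ++ cs.takeWhile pvNotUp) ::
        (pvWords (cs.dropWhile pvNotUp)).map PySem.Chars.lower := by
  induction cs with
  | nil =>
    intro ws cur h
    simp [pvExtract, pvWords, h]
  | cons c cs ih =>
    intro ws cur h
    rw [List.foldl_cons]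
    by_cases hup : PySem.Chars.isupper c = true
    · have hstep : pvStepA (ws, cur) c = (ws ++ [PySem.Chars.lower cur], [c]) := by
        simp [pvStepA, hup, h]
      rw [hstep, ih _ _ (by simp)]
      have ht : (c :: cs).takeWhile pvNotUp = [] := by
        simp [pvNotUp, hup]
      have hd : (c :: cs).dropWhile pvNotUp = c :: cs := by
        simp [pvNotUp, hup]
      rw [ht, hd, pvWords]
      simp [List.append_assoc]
    · have hstep : pvStepA (ws, cur) c = (ws, cur ++ [c]) := by
        simp [pvStepA, hup]
      rw [hstep, ih _ _ (by simp)]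
      have ht : (c :: cs).takeWhile pvNotUp = c :: cs.takeWhile pvNotUp := by
        simp [pvNotUp, hup]
      have hd : (c :: cs).dropWhile pvNotUp = cs.dropWhile pvNotUp := by
        simp [pvNotUp, hup]
      rw [ht, hd]
      simp [List.append_assoc]

def pvUidx (xs : List Char) (s : Int) : List Int :=
  ((PySem.List.enumerate xs s).filter (fun p => PySem.Chars.isupper p.2)).map (fun p => p.1)

lemma pvUidx_nil (s : Int) : pvUidx [] s = [] := by
  simp [pvUidx, PySem.List.enumerate_nil]

lemma pvUidx_cons (c : Char) (cs : List Char) (s : Int) :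
    pvUidx (c :: cs) s = (if PySem.Chars.isupper c then [s] else []) ++ pvUidx cs (s + 1) := by
  simp [pvUidx, PySem.List.enumerate_cons, List.filter_cons]
  split <;> simp

lemma pvUidx_ge (xs : List Char) : ∀ (s : Int) (i : Int), i ∈ pvUidx xs s → s ≤ i := by
  induction xs with
  | nil => intro s i h; rw [pvUidx_nil] at h; cases h
  | cons c cs ih =>
    intro s i h
    rw [pvUidx_cons] at h
    rcases List.mem_append.1 h with h1 | h2
    · split at h1
      · simp at h1; omega
      · simp at h1
    · have := ih (s + 1) i h2; omega

lemma pvUidx_shift (xs : List Char) : ∀ (s j : Int), pvUidx xs (s + j) = (pvUidx xs s).map (· + j) := by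
  induction xs with
  | nil => intro s j; simp [pvUidx_nil]
  | cons c cs ih =>
    intro s j
    rw [pvUidx_cons, pvUidx_cons, List.map_append]
    congr 1
    · split <;> simp
    · rw [show s + j + 1 = s + 1 + j by ring]
      exact ih (s + 1) j

lemma pvUidx_append (xs ys : List Char) : ∀ (s : Int),
    pvUidx (xs ++ ys) s = pvUidx xs s ++ pvUidx ys (s + xs.length) := by
  induction xs with
  | nil => intro s; simp [pvUidx_nil]
  | cons c cs ih =>
    intro s
    rw [List.cons_append, pvUidx_cons, pvUidx_cons, ih (s + 1), List.append_assoc]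
    congr 3
    push_cast [List.length_cons]
    ring

lemma pvUidx_nonup (xs : List Char) (h : ∀ c ∈ xs, pvNotUp c = true) : ∀ s, pvUidx xs s = [] := by
  induction xs with
  | nil => intro s; exact pvUidx_nil s
  | cons c cs ih =>
    intro s
    have hc : PySem.Chars.isupper c = false := by
      have := h c (by simp)
      simpa [pvNotUp] using this
    rw [pvUidx_cons, hc, ih (fun d hd => h d (by simp [hd])) (s + 1)]
    simp

-- B's cut points and raw word list, as functions of the char list
def pvCutsOf (l : List Char) : List Int :=
  (0 : Int) :: ((pvUidx l 0).filter (fun i => (0:Int) < i) ++ [(l.length : Int)])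

def pvRawOf (l : List Char) : List (List Char) :=
  ((pvCutsOf l).zip (pvCutsOf l).tail).map (fun p => PySem.List.slice l (some p.1) (some p.2))

lemma pvDropHead (p : Char → Bool) : ∀ (cs : List Char) (u : Char) (ds : List Char),
    cs.dropWhile p = u :: ds → p u = false := by
  intro cs
  induction cs with
  | nil => intro u ds h; simp at h
  | cons a l ih =>
    intro u ds h
    rw [List.dropWhile_cons] at h
    split at h
    · exact ih u ds h
    · rename_i ha
      cases h
      simpa using ha

lemma pvCuts_nonneg (l : List Char) : ∀ x ∈ pvCutsOf l, 0 ≤ x := by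
  intro x hx
  rcases List.mem_cons.1 hx with h0 | h1
  · omega
  · rcases List.mem_append.1 h1 with h2 | h3
    · have := pvUidx_ge l 0 x (List.mem_of_mem_filter h2)
      omega
    · simp at h3
      omega

lemma pvPosFilter (c : Char) (cs : List Char) :
    (pvUidx (c :: cs) 0).filter (fun i => (0:Int) < i) = pvUidx cs 1 := by
  rw [pvUidx_cons, List.filter_append]
  have h2 : List.filter (fun i => decide ((0:Int) < i)) (pvUidx cs 1) = pvUidx cs 1 :=
    List.filter_eq_self.2 (fun i hi => by
      have := pvUidx_ge cs 1 i hi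
      simp only [decide_eq_true_eq]
      omega)
  rw [show (0:Int) + 1 = 1 by ring, h2]
  split <;> simp

lemma pvSliceShift {α : Type} (l : List α) (j : Nat) (a b : Int) (ha : 0 ≤ a) (hb : 0 ≤ b) :
    PySem.List.slice l (some (a + j)) (some (b + j)) = PySem.List.slice (l.drop j) (some a) (some b) := by
  rw [PySem.List.slice_toNat _ (by omega : (0:Int) ≤ a + j) (by omega : (0:Int) ≤ b + j),
      PySem.List.slice_toNat _ ha hb]
  rw [List.drop_drop]
  have h1 : (b + (j : Int)).toNat = b.toNat + j := by omega
  have h2 : (a + (j : Int)).toNat = a.toNat + j := by omega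
  rw [h1, h2, show b.toNat + j - (a.toNat + j) = b.toNat - a.toNat by omega, Nat.add_comm]

lemma pvRaw_eq_words : ∀ (l : List Char), l ≠ [] → pvRawOf l = pvWords l := by
  intro l
  induction l using pvWords.induct with
  | case1 => intro h; exact absurd rfl h
  | case2 c cs ih =>
    intro _
    have hcs : cs.takeWhile pvNotUp ++ cs.dropWhile pvNotUp = cs := List.takeWhile_append_dropWhile
    set t := cs.takeWhile pvNotUp with htdef
    have htw : ∀ x ∈ t, pvNotUp x = true := fun x hx => List.mem_takeWhile_imp hx
    have hU : pvUidx cs 1 = pvUidx (cs.dropWhile pvNotUp) (1 + (t.length : Int)) := by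
      conv_lhs => rw [← hcs]
      rw [pvUidx_append, pvUidx_nonup t htw 1]
      simp
    cases hd : cs.dropWhile pvNotUp with
    | nil =>
      -- no uppercase boundary inside cs: one single word
      have hct : cs = t := by rw [← hcs, hd, List.append_nil]
      have hU0 : pvUidx cs 1 = [] := by rw [hU, hd, pvUidx_nil]
      have hcuts : pvCutsOf (c :: cs) = [0, ((c :: cs).length : Int)] := by
        rw [pvCutsOf, pvPosFilter, hU0]
        rfl
      have hslice : PySem.List.slice (c :: cs) (some 0) (some ((c :: cs).length : Int)) = c :: cs := by
        rw [PySem.List.slice_toNat _ le_rfl (by positivity)]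
        simp
      rw [pvRawOf, hcuts]
      simp only [List.tail_cons, List.zip_cons_cons, List.zip_nil_right, List.map_cons, List.map_nil]
      rw [hslice, pvWords, hd, ← htdef]
      simp [pvWords, hct]
    | cons u ds =>
      have hdne : cs.dropWhile pvNotUp ≠ [] := by rw [hd]; simp
      have hu : PySem.Chars.isupper u = true := by
        have := pvDropHead pvNotUp cs u ds hd
        simpa [pvNotUp] using this
      have hlen : cs.length = t.length + (u :: ds).length := by
        conv_lhs => rw [← hcs, hd]
        simp
      -- the cut list of c :: cs is the shifted cut list of the dropWhile tail, with 0 in front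
      have hC : pvCutsOf (c :: cs) =
          0 :: (pvCutsOf (u :: ds)).map (· + ((t.length + 1 : Nat) : Int)) := by
        rw [pvCutsOf, pvPosFilter, hU, hd, pvUidx_cons, hu, if_pos rfl]
        rw [pvCutsOf, pvPosFilter]
        rw [show (1 : Int) + (t.length : Int) + 1 = 1 + ((t.length + 1 : Nat) : Int) by push_cast; ring]
        rw [pvUidx_shift ds 1 ((t.length + 1 : Nat) : Int)]
        rw [List.map_cons, List.map_append, List.map_singleton]
        simp only [List.cons_append, List.nil_append]
        have hlast : ((c :: cs).length : Int) = 1 + (t.length : Int) + ((u :: ds).length : Int) := by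
          push_cast [List.length_cons, hlen]
          ring
        rw [hlast,
            show (0:Int) + ((t.length + 1 : Nat) : Int) = 1 + (t.length : Int) by push_cast; ring,
            show ((u :: ds).length : Int) + ((t.length + 1 : Nat) : Int)
              = 1 + (t.length : Int) + ((u :: ds).length : Int) by push_cast; ring]
      rw [pvRawOf, hC]
      have hCd : pvCutsOf (u :: ds) =
          0 :: (pvUidx ds 1 ++ [((u :: ds).length : Int)]) := by
        rw [pvCutsOf, pvPosFilter]
      -- zip of the shifted cut list
      rw [show (0 :: (pvCutsOf (u :: ds)).map (· + ((t.length + 1 : Nat) : Int))).tail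
            = (pvCutsOf (u :: ds)).map (· + ((t.length + 1 : Nat) : Int)) from rfl]
      have hzip : (0 :: (pvCutsOf (u :: ds)).map (· + ((t.length + 1 : Nat) : Int))).zip
            ((pvCutsOf (u :: ds)).map (· + ((t.length + 1 : Nat) : Int)))
          = (0, ((t.length + 1 : Nat) : Int)) ::
              ((pvCutsOf (u :: ds)).zip (pvCutsOf (u :: ds)).tail).map
                (Prod.map (· + ((t.length + 1 : Nat) : Int)) (· + ((t.length + 1 : Nat) : Int))) := by
        rw [hCd]
        simp only [List.tail_cons, ← List.zip_map, List.map_cons, List.zip_cons_cons]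
        simp
      rw [hzip, List.map_cons, List.map_map]
      have hdrop : (c :: cs).drop (t.length + 1) = u :: ds := by
        conv_lhs => rw [← hcs, hd]
        rw [List.drop_succ_cons, List.drop_left]
      have hhead : PySem.List.slice (c :: cs) (some 0) (some ((t.length + 1 : Nat) : Int)) = c :: t := by
        rw [PySem.List.slice_toNat _ le_rfl (by positivity)]
        conv_lhs => rw [← hcs]
        simp [List.take_succ_cons]
      have htailmap :
          (((pvCutsOf (u :: ds)).zip (pvCutsOf (u :: ds)).tail).map
            ((fun p => PySem.List.slice (c :: cs) (some p.1) (some p.2)) ∘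
              Prod.map (· + ((t.length + 1 : Nat) : Int)) (· + ((t.length + 1 : Nat) : Int))))
          = pvRawOf (u :: ds) := by
        rw [pvRawOf]
        apply List.map_congr_left
        intro p hp
        have hp1 : p.1 ∈ pvCutsOf (u :: ds) := (List.of_mem_zip hp).1
        have hp2 : p.2 ∈ pvCutsOf (u :: ds) := List.mem_of_mem_tail (List.of_mem_zip hp).2
        have h1 : 0 ≤ p.1 := pvCuts_nonneg _ _ hp1
        have h2 : 0 ≤ p.2 := pvCuts_nonneg _ _ hp2
        show PySem.List.slice (c :: cs) (some (p.1 + ((t.length + 1 : Nat) : Int)))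
            (some (p.2 + ((t.length + 1 : Nat) : Int))) = _
        rw [pvSliceShift _ (t.length + 1) p.1 p.2 h1 h2, hdrop]
      have ihd : pvRawOf (u :: ds) = pvWords (u :: ds) := by rw [← hd]; exact ih hdne
      rw [hhead, htailmap, ihd]
      conv_rhs => rw [pvWords]
      rw [hd, ← htdef]

lemma pvJoinNil (xs : List (List Char)) : PySem.Chars.join [] xs = xs.flatten := by
  induction xs with
  | nil => simp [PySem.Chars.join_nil]
  | cons a t ih =>
    cases t with
    | nil => simp [PySem.Chars.join_singleton]
    | cons b t2 =>
      rw [PySem.Chars.join_cons_cons]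
      simp [ih]

lemma pvFoldCap (rest : List (List Char)) : ∀ (w0 : List Char),
    rest.foldl (fun acc w => acc ++ pvCapitalize w) w0 = w0 ++ (rest.map pvCapitalize).flatten := by
  induction rest with
  | nil => intro w0; simp
  | cons w ws ih => intro w0; simp [List.foldl_cons, ih, List.append_assoc]

lemma pvTrunc (res : List Char) :
    (if res.length > 40 then String.ofList (PySem.List.slice res none (some 40)) else String.ofList res)
      = String.ofList (PySem.List.slice res none (some 40)) := by
  split_ifs with h
  · rfl
  · rw [PySem.List.slice_to _ (by omega : (0:Int) ≤ 40), List.take_of_length_le (by omega)]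

-- ===== VERDICT (by name: the statement is the Claim_ definition above) =====
theorem abbreviate_py_spec : Claim_equal_abbreviate_py := by
  intro name _
  unfold Spec_abbreviate_py
  cases hl : name.toList with
  | nil =>
    simp only [abbreviate_py, abbreviate_py_alt, hl]
    decide
  | cons c cs =>
    have hfold : pvExtract ((c :: cs).foldl pvStepA ([], []))
        = (pvWords (c :: cs)).map PySem.Chars.lower := by
      rw [List.foldl_cons]
      have h0 : pvStepA ([], []) c = ([], [c]) := by simp [pvStepA]
      rw [h0, pvA_loop cs [] [c] (by simp)]
      conv_rhs => rw [pvWords]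
      simp
    have hraw := pvRaw_eq_words (c :: cs) (by simp)
    unfold pvExtract at hfold
    unfold pvRawOf pvCutsOf pvUidx at hraw
    simp only [abbreviate_py, abbreviate_py_alt, hl]
    rw [hfold, hraw]
    obtain ⟨w, ws, hw⟩ : ∃ w ws, pvWords (c :: cs) = w :: ws := ⟨_, _, by rw [pvWords]⟩
    rw [hw]
    simp only [List.map_cons, List.headD_cons, List.tail_cons]
    rw [pvFoldCap, pvTrunc, pvJoinNil]
    simp [List.map_map, Function.comp_def]
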